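-- pv_equiv track=rewrite | github.com/dhruvnps/google-foobar | Level 5/expanding-nebula/solution.py | nodes_list
-- ===== SOURCE A (Python) =====
-- def nodes_list(cols, h):
--     nodes_list = [[] for _ in cols]
--     for n1 in range(2 ** (h + 1)):
--         for n2 in range(2 ** (h + 1)):
--             nxt_col = nxt([n1, n2], h)
--             for idx, col in enumerate(cols):
--                 if col == nxt_col:
--                     nodes_list[idx].append([n1, n2])
--     return nodes_list
--
-- def nxt(prev, h):
--     n = 0
--     for idx in range(h):
--         c = ((prev[0] >> idx & 1) +
--              (prev[1] >> idx & 1) +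
--              (prev[0] >> (idx + 1) & 1) +
--              (prev[1] >> (idx + 1) & 1))
--         n = (n << 1) + (c == 1)
--     return n
-- ===== SOURCE B (Python) =====
-- def nodes_list(cols, h):
--     size = 2 ** (h + 1)
--
--     def matches(col, n1):
--         # All n2 (in increasing order) with nxt([n1, n2], h) == col, built by
--         # inverting the successor rule: choose n2's bits from most to least
--         # significant; column bit (h - 1 - idx) constrains bits idx and idx + 1.
--         if col < 0 or col >> h:
--             return []  # a successor column is always an h-bit value
--         partials = [0, 1]
--         for idx in range(h - 1, -1, -1):
--             a = n1 >> idx & 1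
--             a2 = n1 >> (idx + 1) & 1
--             target = col >> (h - 1 - idx) & 1
--             new = []
--             for p in partials:
--                 for b in (0, 1):
--                     if ((a + b + a2 + (p & 1)) == 1) == (target == 1):
--                         new.append((p << 1) + b)
--             partials = new
--         return partials
--
--     return [[[n1, n2] for n1 in range(size) for n2 in matches(col, n1)]
--             for col in cols]
-- ===== Notes on version B (the rewrite author's own statement) =====
-- stated objective: alternative
-- what changed: A enumerates all 4^(h+1) (n1,n2) pairs, computes each pair's successor with nxt and scans cols for matches; B never computes nxt at all: for each column it runs the rule backwards, constructing the matching n2 values for every n1 by a bit-by-bit preimage DP (choosing n2's bits most-significant-first under the per-bit successor constraint), so non-matching pairs are pruned instead of filtered.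
-- outside the precondition, e.g. on nodes_list([0], -1): A returns [[[0, 0]]], B raises ValueError
import Mathlib
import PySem

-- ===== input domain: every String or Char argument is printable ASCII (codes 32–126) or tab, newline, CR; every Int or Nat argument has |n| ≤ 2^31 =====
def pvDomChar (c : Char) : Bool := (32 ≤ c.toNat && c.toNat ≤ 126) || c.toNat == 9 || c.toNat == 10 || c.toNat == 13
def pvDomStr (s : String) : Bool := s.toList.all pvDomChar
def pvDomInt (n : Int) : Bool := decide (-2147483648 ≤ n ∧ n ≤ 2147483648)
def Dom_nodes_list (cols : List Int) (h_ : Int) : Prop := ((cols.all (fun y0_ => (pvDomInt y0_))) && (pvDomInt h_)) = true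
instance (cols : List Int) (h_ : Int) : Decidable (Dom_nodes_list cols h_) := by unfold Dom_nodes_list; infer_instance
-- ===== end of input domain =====

-- B replaces A's forward enumeration (compute nxt for every pair (n1, n2) and scan cols for
-- matches) by a per-column backward construction: for each col and n1 it builds the matching
-- n2 values bit by bit, inverting the successor rule (objective: alternative algorithm).

-- ===== PORT A =====
-- literal port of the module helper nxt([n1, n2], h)
def nxtFn (p0 p1 : Int) (h_ : Int) : Int :=
  (PySem.List.pyRange 0 h_ 1).foldl (fun n idx =>
    let c : Int := PySem.Int.band (p0 >>> idx.toNat) 1 + PySem.Int.band (p1 >>> idx.toNat) 1 +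
                   PySem.Int.band (p0 >>> (idx.toNat + 1)) 1 + PySem.Int.band (p1 >>> (idx.toNat + 1)) 1
    (n <<< (1 : Nat)) + (if c = 1 then 1 else 0)) 0

def nodes_list (cols : List Int) (h_ : Int) : List (List (List Int)) :=
  -- nodes_list = [[] for _ in cols]; nested loops append [n1,n2] at every idx with cols[idx] == nxt_col
  (PySem.List.pyRange 0 (2 ^ (h_ + 1).toNat) 1).foldl (fun st n1 =>
    (PySem.List.pyRange 0 (2 ^ (h_ + 1).toNat) 1).foldl (fun st n2 =>
      let nxt_col := nxtFn n1 n2 h_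
      (PySem.List.enumerate cols 0).foldl (fun st ic =>
        if ic.2 = nxt_col then
          PySem.List.pySetD st ic.1 (PySem.List.pyGetD st ic.1 [] ++ [[n1, n2]])
        else st) st) st)
    (cols.map (fun _ => []))

-- ===== PORT B =====
-- port of Source B's helper matches(col, n1): chooses n2's bits most-significant-first
def matchesFn (col : Int) (n1 : Int) (h_ : Int) : List Int :=
  if decide (col < 0) || decide (col >>> (h_.toNat : Int) ≠ 0) then []
  else
    (PySem.List.pyRange (h_ - 1) (-1) (-1)).foldl (fun partials idx =>
      partials.foldl (fun new p =>
        ([0, 1] : List Int).foldl (fun new b =>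
          if decide (PySem.Int.band (n1 >>> (idx.toNat : Int)) 1 + b
                + PySem.Int.band (n1 >>> ((idx.toNat : Int) + 1)) 1 + PySem.Int.band p 1 = 1)
              == decide (PySem.Int.band (col >>> ((((h_ - 1 - idx).toNat : Nat) : Int))) 1 = 1)
          then new ++ [(p <<< (1 : Nat)) + b] else new) new) []) [0, 1]

def nodes_list_alt (cols : List Int) (h_ : Int) : List (List (List Int)) :=
  cols.map (fun col =>
    (PySem.List.pyRange 0 (2 ^ (h_ + 1).toNat) 1).foldl (fun acc n1 =>
      acc ++ (matchesFn col n1 h_).map (fun n2 => [n1, n2])) [])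

-- ===== PRECONDITION & SPEC =====
-- Pre_ excludes negative h: for h ≤ -2 A raises TypeError (2 ** (h + 1) is a float in
-- range()); at the degenerate h = -1, where A returns via 2 ** 0 == 1, B's bitwise
-- construction raises ValueError on the negative shift col >> h.
def Pre_nodes_list (cols : List Int) (h_ : Int) : Prop := 0 ≤ h_
instance (cols : List Int) (h_ : Int) : Decidable (Pre_nodes_list cols h_) := by unfold Pre_nodes_list; infer_instance
def pvWitness_nodes_list : List Int × Int := ([0, 1, 2], 1)

def Spec_nodes_list (cols : List Int) (h_ : Int) (out : List (List (List Int))) : Prop := out = nodes_list_alt cols h_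
instance (cols : List Int) (h_ : Int) (out : List (List (List Int))) : Decidable (Spec_nodes_list cols h_ out) := by unfold Spec_nodes_list; infer_instance

-- ===== CLAIM (what is proved, stated in full; the proofs are below) =====
def Claim_equal_nodes_list : Prop := ∀ (cols : List Int) (h_ : Int), Dom_nodes_list cols h_ → Pre_nodes_list cols h_ → Spec_nodes_list cols h_ (nodes_list cols h_)

-- ===== LEMMAS AND PROOFS =====

-- Nat-level value of nxt, phrased by the recursion B's DP inverts: the leading column bit
-- (weight 2^L) comes from the two low bit-pairs, the rest is nxt of the shifted pair.
def nxtN : Nat → Nat → Nat → Nat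
  | _, _, 0 => 0
  | m1, m2, L + 1 =>
      (if m1 % 2 + m2 % 2 + m1 / 2 % 2 + m2 / 2 % 2 = 1 then 1 else 0) * 2 ^ L
        + nxtN (m1 / 2) (m2 / 2) L

theorem nxtN_lt (L : Nat) : ∀ (m1 m2 : Nat), nxtN m1 m2 L < 2 ^ L := by
  induction L with
  | zero => intro m1 m2; simp [nxtN]
  | succ L ih =>
    intro m1 m2
    have := ih (m1 / 2) (m2 / 2)
    unfold nxtN
    split_ifs <;> simp [pow_succ] <;> omega

theorem band_one_natCast (m : Nat) : PySem.Int.band (m : Int) 1 = ((m % 2 : Nat) : Int) := by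
  have := PySem.Int.band_natCast m 1
  simpa [Nat.and_one_is_mod] using this

theorem nat_shiftRight_half (x i : Nat) : x >>> (i + 1) = (x / 2) >>> i := by
  rw [Nat.shiftRight_eq_div_pow, Nat.shiftRight_eq_div_pow, Nat.div_div_eq_div_mul, pow_succ']

def eN (m1 m2 i : Nat) : Nat :=
  if (m1 >>> i) % 2 + (m2 >>> i) % 2 + (m1 >>> (i + 1)) % 2 + (m2 >>> (i + 1)) % 2 = 1 then 1 else 0

theorem eN_succ (m1 m2 i : Nat) : eN m1 m2 (i + 1) = eN (m1 / 2) (m2 / 2) i := by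
  unfold eN
  rw [nat_shiftRight_half m1, nat_shiftRight_half m2, nat_shiftRight_half m1 (i+1), nat_shiftRight_half m2 (i+1)]

theorem foldInt : ∀ (L m1 m2 : Nat) (a : Int),
    (List.range L).foldl (fun (n : Int) (i : Nat) => 2 * n + ((eN m1 m2 i : Nat) : Int)) a
      = a * 2 ^ L + ((nxtN m1 m2 L : Nat) : Int) := by
  intro L
  induction L with
  | zero => intro m1 m2 a; simp [nxtN]
  | succ L ih =>
    intro m1 m2 a
    rw [List.range_succ_eq_map]
    simp only [List.foldl_cons, List.foldl_map]
    have hbody : (fun (n : Int) (i : Nat) => 2 * n + ((eN m1 m2 (i + 1) : Nat) : Int))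
        = (fun (n : Int) (i : Nat) => 2 * n + ((eN (m1 / 2) (m2 / 2) i : Nat) : Int)) := by
      funext n i; rw [eN_succ]
    simp only [Nat.succ_eq_add_one, hbody]
    rw [ih]
    have he : eN m1 m2 0 = (if m1 % 2 + m2 % 2 + m1 / 2 % 2 + m2 / 2 % 2 = 1 then 1 else 0) := by
      unfold eN
      simp [Nat.shiftRight_eq_div_pow]
    rw [show nxtN m1 m2 (L+1) = (if m1 % 2 + m2 % 2 + m1 / 2 % 2 + m2 / 2 % 2 = 1 then 1 else 0) * 2 ^ L + nxtN (m1 / 2) (m2 / 2) L from rfl]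
    rw [he]
    split_ifs <;> push_cast <;> ring

theorem nxtFn_eq_nxtN (m1 m2 h : Nat) : nxtFn (m1 : Int) (m2 : Int) (h : Int) = ((nxtN m1 m2 h : Nat) : Int) := by
  unfold nxtFn
  rw [PySem.List.pyRange_zero_natCast, List.foldl_map]
  calc (List.range h).foldl _ 0
      = (List.range h).foldl (fun (n : Int) (i : Nat) => 2 * n + ((eN m1 m2 i : Nat) : Int)) 0 := by
        apply PySem.List.foldl_congr_mem
        intro acc i _
        have hcast1 : ((i : Int) + 1) = (((i + 1 : Nat)) : Int) := by push_cast; ring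
        simp only [Int.toNat_natCast, hcast1, Int.shiftRight_natCast, band_one_natCast,
          Int.shiftLeft_eq]
        have hc : ((((m1 >>> i) % 2 : Nat) : Int) + (((m2 >>> i) % 2 : Nat) : Int) +
            (((m1 >>> (i+1)) % 2 : Nat) : Int) + (((m2 >>> (i+1)) % 2 : Nat) : Int) = 1)
            ↔ ((m1 >>> i) % 2 + (m2 >>> i) % 2 + (m1 >>> (i + 1)) % 2 + (m2 >>> (i + 1)) % 2 = 1) := by
          constructor <;> intro hx <;> exact_mod_cast hx
        unfold eN
        split_ifs with h1 h2 h2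
        · push_cast; ring
        · exact absurd (hc.mp h1) h2
        · exact absurd (hc.mpr h2) h1
        · push_cast; ring
    _ = 0 * 2 ^ h + ((nxtN m1 m2 h : Nat) : Int) := foldInt h m1 m2 0
    _ = ((nxtN m1 m2 h : Nat) : Int) := by ring

theorem pv_step_shape (accept : Int → Int → Bool) (q : Nat → Bool) (m : Nat) :
    (((List.range m).filter q).map (Nat.cast : Nat → Int)).foldl
        (fun new p => ([0, 1] : List Int).foldl
          (fun new b => if accept p b then new ++ [(p <<< (1 : Nat)) + b] else new) new) []
    = ((List.range (2 * m)).filter (fun i => q (i / 2) && accept ((i / 2 : Nat) : Int) ((i % 2 : Nat) : Int))).map (Nat.cast : Nat → Int) := by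
  have hsh : (fun (new : List Int) (p : Int) => ([0, 1] : List Int).foldl
          (fun new b => if accept p b then new ++ [(p <<< (1 : Nat)) + b] else new) new)
      = fun (new : List Int) (p : Int) => new ++ (([0, 1] : List Int).filter (accept p)).map (fun b => (p <<< (1 : Nat)) + b) := by
    funext new p
    exact PySem.List.foldl_append_if (accept p) (fun b => (p <<< (1 : Nat)) + b) [0, 1] new
  rw [hsh]
  rw [PySem.List.foldl_append_eq_flatMap]
  simp only [List.nil_append]
  induction m with
  | zero => simp
  | succ m ih =>
    rw [List.range_succ, show 2 * (m + 1) = (2 * m + 1) + 1 from by ring, List.range_succ,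
      List.range_succ]
    simp only [List.filter_append, List.map_append, List.flatMap_append]
    rw [List.append_assoc, ih]
    congr 1
    have hd1 : (2 * m) / 2 = m := by omega
    have hm1 : (2 * m) % 2 = 0 := by omega
    have hd2 : (2 * m + 1) / 2 = m := by omega
    have hm2 : (2 * m + 1) % 2 = 1 := by omega
    have c0 : ((m : Int) <<< (1 : Nat)) = ((2 * m : Nat) : Int) := by
      rw [Int.shiftLeft_eq]; push_cast; ring
    have c1 : ((2 * m : Nat) : Int) + (1 : Int) = ((2 * m + 1 : Nat) : Int) := by
      push_cast; ring
    simp only [List.filter_cons, List.filter_nil, hd1, hm1, hd2, hm2]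
    by_cases hq : q m
    · by_cases ha0 : accept (m : Int) (0 : Int) <;> by_cases ha1 : accept (m : Int) (1 : Int)
      all_goals simp [hq, ha0, ha1, c0]

    · simp [hq]

-- one DP level refines the range filter: the new bit must reproduce the next column bit
theorem pv_pred_step (m1 colT h j : Nat) (hj : j < h) (i : Nat) :
    (decide (nxtN (m1 >>> (h - j)) (i / 2) j = colT % 2 ^ j) &&
      (decide ((((m1 >>> (h - 1 - j)) % 2 : Nat) : Int) + ((i % 2 : Nat) : Int) +
               (((m1 >>> (h - j)) % 2 : Nat) : Int) + (((i / 2) % 2 : Nat) : Int) = 1)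
        == decide ((((colT >>> j) % 2 : Nat) : Int) = 1)))
    = decide (nxtN (m1 >>> (h - (j + 1))) i (j + 1) = colT % 2 ^ (j + 1)) := by
  have hrec : nxtN (m1 >>> (h - (j + 1))) i (j + 1)
      = (if (m1 >>> (h - 1 - j)) % 2 + i % 2 + (m1 >>> (h - j)) % 2 + (i / 2) % 2 = 1 then 1 else 0) * 2 ^ j
        + nxtN (m1 >>> (h - j)) (i / 2) j := by
    have h1 : h - (j + 1) = h - 1 - j := by omega
    have h2 : (m1 >>> (h - 1 - j)) / 2 = m1 >>> (h - j) := by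
      rw [Nat.shiftRight_eq_div_pow, Nat.shiftRight_eq_div_pow, Nat.div_div_eq_div_mul, ← pow_succ,
        show h - 1 - j + 1 = h - j from by omega]
    rw [show nxtN (m1 >>> (h - (j + 1))) i (j + 1)
        = (if (m1 >>> (h - (j + 1))) % 2 + i % 2 + (m1 >>> (h - (j + 1))) / 2 % 2 + (i / 2) % 2 = 1 then 1 else 0) * 2 ^ j
          + nxtN ((m1 >>> (h - (j + 1))) / 2) (i / 2) j from rfl, h1, h2]
  have hmod : colT % 2 ^ (j + 1) = colT % 2 ^ j + 2 ^ j * (colT / 2 ^ j % 2) := Nat.mod_pow_succ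
  have hsr : colT >>> j = colT / 2 ^ j := Nat.shiftRight_eq_div_pow colT j
  have hX : nxtN (m1 >>> (h - j)) (i / 2) j < 2 ^ j := nxtN_lt j _ _
  have hC : colT % 2 ^ j < 2 ^ j := Nat.mod_lt _ (Nat.pow_pos (by norm_num : 0 < 2))
  have htb : colT / 2 ^ j % 2 < 2 := Nat.mod_lt _ (by norm_num)
  rw [Bool.eq_iff_iff]
  simp only [Bool.and_eq_true, decide_eq_true_eq, beq_iff_eq, decide_eq_decide]
  rw [hrec, hmod, hsr]
  have hcast : ((((m1 >>> (h - 1 - j)) % 2 : Nat) : Int) + ((i % 2 : Nat) : Int) +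
      (((m1 >>> (h - j)) % 2 : Nat) : Int) + (((i / 2) % 2 : Nat) : Int) = 1)
      ↔ ((m1 >>> (h - 1 - j)) % 2 + i % 2 + (m1 >>> (h - j)) % 2 + (i / 2) % 2 = 1) := by
    constructor <;> intro hx <;> exact_mod_cast hx
  have hcast2 : ((((colT / 2 ^ j) % 2 : Nat) : Int) = 1) ↔ (colT / 2 ^ j % 2 = 1) := by
    constructor <;> intro hx <;> exact_mod_cast hx
  rw [hcast, hcast2]
  have htb01 : colT / 2 ^ j % 2 = 0 ∨ colT / 2 ^ j % 2 = 1 := by omega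
  by_cases hc : (m1 >>> (h - 1 - j)) % 2 + i % 2 + (m1 >>> (h - j)) % 2 + (i / 2) % 2 = 1
  · rw [if_pos hc]
    rcases htb01 with h0 | h0 <;> rw [h0] <;> constructor
    · rintro ⟨hx, hiff⟩; omega
    · intro hx; constructor <;> omega
    · rintro ⟨hx, hiff⟩; omega
    · intro hx; constructor <;> omega
  · rw [if_neg hc]
    rcases htb01 with h0 | h0 <;> rw [h0] <;> constructor
    · rintro ⟨hx, hiff⟩; omega
    · intro hx; constructor <;> omega
    · rintro ⟨hx, hiff⟩; omega
    · intro hx; constructor <;> omega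

theorem pv_one_level (m1 colT h j : Nat) (hj : j < h) :
    (fun (partials : List Int) (idx : Int) =>
        partials.foldl (fun new p =>
          ([0, 1] : List Int).foldl (fun new b =>
            if decide (PySem.Int.band ((m1 : Int) >>> (idx.toNat : Int)) 1 + b
                  + PySem.Int.band ((m1 : Int) >>> ((idx.toNat : Int) + 1)) 1 + PySem.Int.band p 1 = 1)
                == decide (PySem.Int.band ((colT : Int) >>> ((((h : Int) - 1 - idx).toNat : Nat) : Int)) 1 = 1)
            then new ++ [(p <<< (1 : Nat)) + b] else new) new) [])
      (((List.range (2 ^ (j + 1))).filter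
          (fun v => decide (nxtN (m1 >>> (h - j)) v j = colT % 2 ^ j))).map (Nat.cast : Nat → Int))
      ((h : Int) - 1 - (j : Int))
    = ((List.range (2 ^ (j + 1 + 1))).filter
        (fun v => decide (nxtN (m1 >>> (h - (j + 1))) v (j + 1) = colT % 2 ^ (j + 1)))).map (Nat.cast : Nat → Int) := by
  have hidx : ((h : Int) - 1 - (j : Int)).toNat = h - 1 - j := by omega
  have htgt : ((h : Int) - 1 - ((h : Int) - 1 - (j : Int))).toNat = j := by omega
  have hplus : (((h - 1 - j : Nat) : Int) + 1) = ((h - j : Nat) : Int) := by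
    have : (h - 1 - j) + 1 = h - j := by omega
    rw [← this]; push_cast; ring
  simp only [hidx, htgt, hplus, Int.shiftRight_natCast, band_one_natCast]
  rw [pv_step_shape (fun p b =>
      decide ((((m1 >>> (h - 1 - j)) % 2 : Nat) : Int) + b + (((m1 >>> (h - j)) % 2 : Nat) : Int) + PySem.Int.band p 1 = 1)
        == decide ((((colT >>> j) % 2 : Nat) : Int) = 1))
    (fun v => decide (nxtN (m1 >>> (h - j)) v j = colT % 2 ^ j)) (2 ^ (j + 1))]
  rw [show 2 * 2 ^ (j + 1) = 2 ^ (j + 1 + 1) from by ring]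
  congr 1
  apply List.filter_congr
  intro i _
  rw [band_one_natCast]
  exact pv_pred_step m1 colT h j hj i

theorem pv_dp_inv (m1 colT h : Nat) :
    ∀ (j : Nat), j ≤ h →
    ((List.range j).map (fun (t : Nat) => ((h : Int) - 1 - (t : Int)))).foldl (fun partials idx =>
        partials.foldl (fun new p =>
          ([0, 1] : List Int).foldl (fun new b =>
            if decide (PySem.Int.band ((m1 : Int) >>> (idx.toNat : Int)) 1 + b
                  + PySem.Int.band ((m1 : Int) >>> ((idx.toNat : Int) + 1)) 1 + PySem.Int.band p 1 = 1)
                == decide (PySem.Int.band ((colT : Int) >>> ((((h : Int) - 1 - idx).toNat : Nat) : Int)) 1 = 1)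
            then new ++ [(p <<< (1 : Nat)) + b] else new) new) []) [0, 1]
    = ((List.range (2 ^ (j + 1))).filter
        (fun v => decide (nxtN (m1 >>> (h - j)) v j = colT % 2 ^ j))).map (Nat.cast : Nat → Int) := by
  intro j
  induction j with
  | zero =>
    intro _
    simp [List.range_succ, nxtN, Nat.mod_one]
  | succ j ih =>
    intro hj1
    have hj : j < h := hj1
    rw [List.range_succ, List.map_append, List.foldl_append, ih (by omega)]
    exact pv_one_level m1 colT h j hj

theorem pyRange_down (h : Nat) :
    PySem.List.pyRange ((h : Int) - 1) (-1) (-1) = (List.range h).map (fun (t : Nat) => ((h : Int) - 1 - (t : Int))) := by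
  unfold PySem.List.pyRange
  norm_num
  rcases Nat.eq_zero_or_pos h with h0 | h0
  · subst h0; norm_num
  · rw [if_pos h0]
    apply List.map_congr_left
    intro t _
    ring

-- matchesFn computes exactly A's per-(col, n1) filter
theorem pv_key (h m1 : Nat) (col : Int) :
    matchesFn col (m1 : Int) (h : Int)
      = (PySem.List.pyRange 0 (2 ^ ((h : Int) + 1).toNat) 1).filter
          (fun n2 => decide (nxtFn (m1 : Int) n2 (h : Int) = col)) := by
  have hR : PySem.List.pyRange 0 (2 ^ ((h : Int) + 1).toNat) 1
      = (List.range (2 ^ (h + 1))).map (Nat.cast : Nat → Int) := by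
    rw [show ((h : Int) + 1).toNat = h + 1 from by omega,
      show ((2 : Int) ^ (h + 1)) = ((2 ^ (h + 1) : Nat) : Int) from by push_cast; ring,
      PySem.List.pyRange_zero_natCast]
  have hfil : ((List.range (2 ^ (h + 1))).map (Nat.cast : Nat → Int)).filter
        (fun n2 => decide (nxtFn (m1 : Int) n2 (h : Int) = col))
      = ((List.range (2 ^ (h + 1))).filter
          (fun m2 => decide (((nxtN m1 m2 h : Nat) : Int) = col))).map (Nat.cast : Nat → Int) := by
    rw [List.filter_map]
    refine congrArg (List.map (Nat.cast : Nat → Int)) ?_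
    apply List.filter_congr
    intro m2 _
    simp only [Function.comp_apply, nxtFn_eq_nxtN]
  rw [hR, hfil]
  unfold matchesFn
  simp only [Int.toNat_natCast]
  by_cases hneg : col < 0
  · rw [if_pos (by simp [hneg])]
    have hfalse : ∀ m2 : Nat, decide (((nxtN m1 m2 h : Nat) : Int) = col) = false := by
      intro m2; simp; omega
    simp [hfalse]
  · push_neg at hneg
    have hc : col = ((col.toNat : Nat) : Int) := by omega
    by_cases hbig : col >>> ((h : Nat) : Int) = 0
    case neg =>
      rw [if_pos (by simp [hbig])]
      have hge : 2 ^ h ≤ col.toNat := by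
        rw [hc, Int.shiftRight_natCast] at hbig
        have hne : col.toNat >>> h ≠ 0 := fun hx => hbig (by rw [hx]; rfl)
        rw [Nat.shiftRight_eq_div_pow] at hne
        by_contra hlt
        push_neg at hlt
        exact hne (Nat.div_eq_of_lt hlt)
      have hfalse : ∀ m2 : Nat, decide (((nxtN m1 m2 h : Nat) : Int) = col) = false := by
        intro m2
        have := nxtN_lt h m1 m2
        simp
        omega
      simp [hfalse]
    case pos =>
      rw [if_neg (by simp [hneg, hbig, not_lt])]
      have hlt : col.toNat < 2 ^ h := by
        rw [hc, Int.shiftRight_natCast] at hbig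
        have h0 : col.toNat >>> h = 0 := by omega
        rw [Nat.shiftRight_eq_div_pow] at h0
        exact Nat.lt_of_div_eq_zero (by positivity) h0
      rw [hc, pyRange_down h, pv_dp_inv m1 col.toNat h h (le_refl h)]
      refine congrArg (List.map (Nat.cast : Nat → Int)) ?_
      apply List.filter_congr
      intro v _
      rw [Nat.sub_self, Nat.shiftRight_zero, Nat.mod_eq_of_lt hlt, decide_eq_decide]
      exact (Nat.cast_inj).symm

-- A's inner enumerate-loop, started on a state of the shape pre ++ cols.map f, appends p to
-- exactly the entries whose column equals v.
theorem pv_inner (v : Int) (p : List Int) :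
    ∀ (cols : List Int) (pre : List (List (List Int))) (f : Int → List (List Int)),
    (PySem.List.enumerate cols (pre.length : Int)).foldl (fun st ic =>
        if ic.2 = v then
          PySem.List.pySetD st ic.1 (PySem.List.pyGetD st ic.1 [] ++ [p])
        else st) (pre ++ cols.map f)
      = pre ++ cols.map (fun c => if c = v then f c ++ [p] else f c) := by
  intro cols
  induction cols with
  | nil => intro pre f; simp [PySem.List.enumerate]
  | cons c cs ih =>
    intro pre f
    have hcons : PySem.List.enumerate (c :: cs) (pre.length : Int)
        = ((pre.length : Int), c) :: PySem.List.enumerate cs ((pre.length : Int) + 1) := by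
      simp [PySem.List.enumerate_cons]
    rw [hcons]
    simp only [List.foldl_cons, List.map_cons]
    have hstep : (if c = v then
          PySem.List.pySetD (pre ++ f c :: cs.map f) (pre.length : Int)
            (PySem.List.pyGetD (pre ++ f c :: cs.map f) (pre.length : Int) [] ++ [p])
        else (pre ++ f c :: cs.map f))
        = (pre ++ [if c = v then f c ++ [p] else f c]) ++ cs.map f := by
      by_cases hc : c = v
      · simp [hc, PySem.List.pyGetD_natCast, PySem.List.pySetD_natCast,
          List.set_append_right]
      · simp [hc]
    rw [hstep]
    have hlen : ((pre.length : Int) + 1) = (((pre ++ [if c = v then f c ++ [p] else f c]).length : Nat) : Int) := by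
      simp
    rw [hlen, ih (pre ++ [if c = v then f c ++ [p] else f c]) f]
    simp

-- A's n2-loop for a fixed n1 filters the processed n2 list per column
theorem pv_n2_loop (h_ : Int) (cols : List Int) (n1 : Int) :
    ∀ (M : List Int) (f : Int → List (List Int)),
    M.foldl (fun st n2 =>
        let nxt_col := nxtFn n1 n2 h_
        (PySem.List.enumerate cols 0).foldl (fun st ic =>
          if ic.2 = nxt_col then
            PySem.List.pySetD st ic.1 (PySem.List.pyGetD st ic.1 [] ++ [[n1, n2]])
          else st) st) (cols.map f)
      = cols.map (fun c => f c ++ (M.filter (fun n2 => decide (nxtFn n1 n2 h_ = c))).map (fun n2 => [n1, n2])) := by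
  intro M
  induction M with
  | nil => intro f; simp
  | cons n2 M ih =>
    intro f
    simp only [List.foldl_cons]
    have hone := pv_inner (nxtFn n1 n2 h_) [n1, n2] cols [] f
    simp only [List.nil_append, List.length_nil, Nat.cast_zero] at hone
    rw [hone, ih]
    apply List.map_congr_left
    intro c _
    rw [List.filter_cons]
    by_cases hc : nxtFn n1 n2 h_ = c
    · simp [hc]
    · have : ¬(c = nxtFn n1 n2 h_) := fun hx => hc hx.symm
      simp [hc, this]

-- A's whole double loop: each column holds the pairs whose successor equals it
theorem pv_a_char (cols : List Int) (h_ : Int) :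
    nodes_list cols h_
      = cols.map (fun c =>
          (PySem.List.pyRange 0 (2 ^ (h_ + 1).toNat) 1).flatMap (fun n1 =>
            ((PySem.List.pyRange 0 (2 ^ (h_ + 1).toNat) 1).filter
                (fun n2 => decide (nxtFn n1 n2 h_ = c))).map (fun n2 => [n1, n2]))) := by
  unfold nodes_list
  have houter : ∀ (N : List Int) (f : Int → List (List Int)),
      N.foldl (fun st n1 =>
        (PySem.List.pyRange 0 (2 ^ (h_ + 1).toNat) 1).foldl (fun st n2 =>
          let nxt_col := nxtFn n1 n2 h_
          (PySem.List.enumerate cols 0).foldl (fun st ic =>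
            if ic.2 = nxt_col then
              PySem.List.pySetD st ic.1 (PySem.List.pyGetD st ic.1 [] ++ [[n1, n2]])
            else st) st) st) (cols.map f)
      = cols.map (fun c => f c ++ N.flatMap (fun n1 =>
          ((PySem.List.pyRange 0 (2 ^ (h_ + 1).toNat) 1).filter
              (fun n2 => decide (nxtFn n1 n2 h_ = c))).map (fun n2 => [n1, n2]))) := by
    intro N
    induction N with
    | nil => intro f; simp
    | cons n1 N ih =>
      intro f
      simp only [List.foldl_cons]
      rw [pv_n2_loop h_ cols n1 (PySem.List.pyRange 0 (2 ^ (h_ + 1).toNat) 1) f, ih]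
      apply List.map_congr_left
      intro c _
      simp [List.flatMap_cons, List.append_assoc]
  rw [houter (PySem.List.pyRange 0 (2 ^ (h_ + 1).toNat) 1) (fun _ => [])]
  simp

-- B's assembly is the same flatMap, built from matchesFn
theorem pv_b_char (cols : List Int) (h_ : Int) :
    nodes_list_alt cols h_
      = cols.map (fun c =>
          (PySem.List.pyRange 0 (2 ^ (h_ + 1).toNat) 1).flatMap (fun n1 =>
            (matchesFn c n1 h_).map (fun n2 => [n1, n2]))) := by
  unfold nodes_list_alt
  apply List.map_congr_left
  intro c _
  rw [PySem.List.foldl_append_eq_flatMap]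
  simp

theorem nodes_list_eq_alt (cols : List Int) (h_ : Int) (hp : 0 ≤ h_) :
    nodes_list cols h_ = nodes_list_alt cols h_ := by
  obtain ⟨h, rfl⟩ : ∃ h : Nat, h_ = (h : Int) := ⟨h_.toNat, by omega⟩
  rw [pv_a_char, pv_b_char]
  apply List.map_congr_left
  intro c _
  have hR : PySem.List.pyRange 0 (2 ^ ((h : Int) + 1).toNat) 1
      = (List.range (2 ^ (h + 1))).map (Nat.cast : Nat → Int) := by
    rw [show ((h : Int) + 1).toNat = h + 1 from by omega,
      show ((2 : Int) ^ (h + 1)) = ((2 ^ (h + 1) : Nat) : Int) from by push_cast; ring,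
      PySem.List.pyRange_zero_natCast]
  conv_lhs => rw [hR]
  conv_rhs => rw [hR]
  rw [List.flatMap_map, List.flatMap_map]
  apply List.flatMap_congr
  intro m1 _
  rw [pv_key h m1 c, hR]

-- ===== VERDICT (by name: the statement is the Claim_ definition above) =====
theorem nodes_list_spec : Claim_equal_nodes_list := by
  intro cols h_ _ hp
  exact nodes_list_eq_alt cols h_ hp
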